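-- pv_equiv track=rewrite | github.com/ilsantino/genesis-lab | src/validation/quality.py | _check_alternating_speakers
-- ===== SOURCE A (Python) =====
-- from typing import Any, Dict, List, Optional, Set, Tuple
--
-- def _check_alternating_speakers(turns: List[Dict]) -> bool:
--     """Check if speakers generally alternate."""
--     if len(turns) < 2:
--         return True
--
--     consecutive = 1
--     max_consecutive = 1
--
--     for i in range(1, len(turns)):
--         if turns[i].get("speaker") == turns[i-1].get("speaker"):
--             consecutive += 1
--             max_consecutive = max(max_consecutive, consecutive)
--         else:
--             consecutive = 1
--
--     return max_consecutive <= 2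
-- ===== SOURCE B (Python) =====
-- from typing import Any, Dict, List, Optional, Set, Tuple
--
-- def _check_alternating_speakers(turns: List[Dict]) -> bool:
--     """Check if speakers generally alternate: no speaker holds 3+ consecutive turns."""
--     sp = [t.get("speaker") for t in turns]
--     return all(not (sp[i] == sp[i + 1] == sp[i + 2]) for i in range(len(sp) - 2))
-- ===== Notes on version B (the rewrite author's own statement) =====
-- stated objective: simpler
-- what changed: Replaced the running consecutive/max-consecutive counter pair with a direct sliding-window test: the speaker list has no run longer than 2 iff no window of three consecutive turns shares one speaker, checked with all() over 3-windows.
import Mathlib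
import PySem

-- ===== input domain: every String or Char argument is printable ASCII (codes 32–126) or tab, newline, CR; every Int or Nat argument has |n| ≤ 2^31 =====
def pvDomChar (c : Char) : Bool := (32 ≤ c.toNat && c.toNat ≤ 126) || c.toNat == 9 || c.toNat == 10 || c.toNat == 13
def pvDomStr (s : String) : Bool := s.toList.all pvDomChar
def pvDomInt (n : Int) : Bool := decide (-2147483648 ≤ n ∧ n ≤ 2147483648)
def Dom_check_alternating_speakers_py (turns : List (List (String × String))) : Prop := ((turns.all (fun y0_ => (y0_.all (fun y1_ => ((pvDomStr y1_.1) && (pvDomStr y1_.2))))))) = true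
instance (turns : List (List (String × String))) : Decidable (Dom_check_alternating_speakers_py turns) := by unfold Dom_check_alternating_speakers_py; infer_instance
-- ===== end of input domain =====

-- B replaces A's running consecutive/max-consecutive counters with a sliding-window
-- test: no three consecutive turns share a speaker (objective: simpler).


-- shared helper: t.get("speaker") on the dict argument (None when the key is absent)
def pvSpk (t : List (String × String)) : Option String :=
  (PySem.Dict.ofList t).get? "speaker"

-- ===== PORT A =====
def check_alternating_speakers_py (turns : List (List (String × String))) : Bool :=
  if PySem.List.len turns < 2 then true
  else
    let st := (PySem.List.pyRange 1 (PySem.List.len turns)).foldl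
      (fun (p : Int × Int) i =>
        if pvSpk (PySem.List.pyGetD turns i []) == pvSpk (PySem.List.pyGetD turns (i - 1) []) then
          (p.1 + 1, max p.2 (p.1 + 1))
        else
          (1, p.2)) (1, 1)
    decide (st.2 ≤ 2)

-- ===== PORT B =====
def check_alternating_speakers_py_alt (turns : List (List (String × String))) : Bool :=
  let sp := turns.map pvSpk
  (PySem.List.pyRange 0 (PySem.List.len sp - 2)).all (fun i =>
    !(PySem.List.pyGetD sp i none == PySem.List.pyGetD sp (i + 1) none
      && PySem.List.pyGetD sp (i + 1) none == PySem.List.pyGetD sp (i + 2) none))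

-- ===== PRECONDITION & SPEC =====
def Spec_check_alternating_speakers_py (turns : List (List (String × String))) (out : Bool) : Prop := out = check_alternating_speakers_py_alt turns
instance (turns : List (List (String × String))) (out : Bool) : Decidable (Spec_check_alternating_speakers_py turns out) := by unfold Spec_check_alternating_speakers_py; infer_instance

-- ===== CLAIM (what is proved, stated in full; the proofs are below) =====
def Claim_equal_check_alternating_speakers_py : Prop := ∀ (turns : List (List (String × String))), Dom_check_alternating_speakers_py turns → Spec_check_alternating_speakers_py turns (check_alternating_speakers_py turns)

-- ===== LEMMAS AND PROOFS =====

-- the adjacent-equality bit at position j of the speaker list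
def pvF (turns : List (List (String × String))) (j : Nat) : Bool :=
  pvSpk (turns.getD (j + 1) []) == pvSpk (turns.getD j [])

-- A's loop body as a function of that bit
def pvG (p : Int × Int) (b : Bool) : Int × Int :=
  if b then (p.1 + 1, max p.2 (p.1 + 1)) else (1, p.2)

-- "no run of length ≥ 3" checker; p = "the current run already has length 2"
def pvCheck : Bool → List Bool → Bool
  | _, [] => true
  | p, b :: r => if b then !p && pvCheck true r else pvCheck false r

lemma pvCheck_cons (p b : Bool) (r : List Bool) :
    pvCheck p (b :: r) = (!(p && b) && pvCheck b r) := by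
  cases p <;> cases b <;> simp [pvCheck]

lemma pvG_mono (eqs : List Bool) : ∀ (c m : Int), m ≤ (List.foldl pvG (c, m) eqs).2 := by
  induction eqs with
  | nil => intro c m; simp
  | cons b r ih =>
    intro c m
    by_cases hb : b = true <;> simp [pvG, hb]
    · exact le_trans (le_max_left m (c + 1)) (ih (c + 1) (max m (c + 1)))
    · exact ih 1 m

lemma pvG_main (eqs : List Bool) :
    ∀ (m : Int) (p : Bool), m ≤ 2 →
      decide ((List.foldl pvG ((if p then 2 else 1), m) eqs).2 ≤ 2) = pvCheck p eqs := by
  induction eqs with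
  | nil => intro m p hm; simp [pvCheck, hm]
  | cons b r ih =>
    intro m p hm
    cases p <;> cases b <;>
      simp only [pvCheck, List.foldl_cons, pvG, if_true, Bool.not_true,
        Bool.not_false, Bool.false_and, Bool.true_and]
    · -- p = false, b = false
      simpa using ih m false hm
    · -- p = false, b = true : the state becomes (2, max m 2)
      simpa using ih (max m 2) true (by omega)
    · -- p = true, b = false
      simpa using ih m false hm
    · -- p = true, b = true : the state becomes (3, max m 3), so the max stays ≥ 3
      have h := pvG_mono r 3 (max m 3)
      simp only [decide_eq_false_iff_not, not_le]
      norm_num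
      omega

lemma pvCheck_zip (eqs : List Bool) :
    ∀ p, pvCheck p eqs
      = (!(p && eqs.headD false) && (eqs.zip eqs.tail).all (fun q => !(q.1 && q.2))) := by
  induction eqs with
  | nil => intro p; simp [pvCheck]
  | cons b r ih =>
    intro p
    rw [pvCheck_cons]
    cases r with
    | nil => simp [pvCheck]
    | cons c r' =>
      rw [ih b]
      simp

lemma pvAllZipTail (l : List Bool) :
    (l.zip l.tail).all (fun q => !(q.1 && q.2))
      = (List.range (l.length - 1)).all (fun i => !(l.getD i false && l.getD (i + 1) false)) := by
  induction l with
  | nil => simp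
  | cons a l ih =>
    cases l with
    | nil => simp
    | cons b r' =>
      simp only [List.tail_cons, List.zip_cons_cons, List.all_cons] at *
      rw [ih]
      have hlen2 : (a :: b :: r').length - 1 = r'.length + 1 := by simp
      have hlen1 : (b :: r').length - 1 = r'.length := by simp
      rw [hlen1, hlen2, List.range_succ_eq_map, List.all_cons, List.all_map]
      have h0 : (!((a :: b :: r').getD 0 false && (a :: b :: r').getD (0 + 1) false))
          = !(a && b) := by simp
      have hfun : ((fun i => !((a :: b :: r').getD i false && (a :: b :: r').getD (i + 1) false))
            ∘ Nat.succ)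
          = (fun i => !((b :: r').getD i false && (b :: r').getD (i + 1) false)) := by
        funext i
        simp [Function.comp]
      rw [h0, hfun]

lemma pvSpk_getD (turns : List (List (String × String))) (j : Nat) :
    (turns.map pvSpk).getD j none = pvSpk (turns.getD j []) := by
  by_cases h : j < turns.length
  · simp [List.getD_eq_getElem?_getD, List.getElem?_map, List.getElem?_eq_getElem h]
  · have h' : turns.length ≤ j := Nat.le_of_not_lt h
    rw [List.getD_eq_default _ _ (by simpa using h'), List.getD_eq_default _ _ h']
    rfl

-- A reduces to the fold of pvG over the adjacent-equality bits
lemma pvA_eq (turns : List (List (String × String))) (h : 2 ≤ turns.length) :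
    check_alternating_speakers_py turns
      = decide ((List.foldl pvG (1, 1)
          ((List.range (turns.length - 1)).map (pvF turns))).2 ≤ 2) := by
  unfold check_alternating_speakers_py
  rw [if_neg (by simp [PySem.List.len_eq]; omega)]
  rw [PySem.List.len_eq, PySem.List.pyRange_of_pos 1 (turns.length : Int) (by norm_num),
    if_pos (by exact_mod_cast h)]
  have hlen : (((turns.length : Int) - 1 + 1 - 1) / 1).toNat = turns.length - 1 := by omega
  rw [hlen, List.foldl_map, List.foldl_map]
  have hfun : (fun (x : Int × Int) (y : Nat) =>
        if (pvSpk (PySem.List.pyGetD turns (1 + 1 * (y : Int)) [])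
            == pvSpk (PySem.List.pyGetD turns (1 + 1 * (y : Int) - 1) [])) = true then
          (x.1 + 1, max x.2 (x.1 + 1))
        else (1, x.2))
      = (fun (x : Int × Int) (y : Nat) => pvG x (pvF turns y)) := by
    funext x y
    have h2 : (1 : Int) + 1 * (y : Int) - 1 = ((y : Nat) : Int) := by omega
    have h1 : (1 : Int) + 1 * (y : Int) = ((y + 1 : Nat) : Int) := by push_cast [Nat.cast_add]; ring
    rw [h2, h1]
    simp only [PySem.List.pyGetD_natCast, pvG, pvF]
    rfl
  rw [hfun]

-- B reduces to the sliding-window check over the same bits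
lemma pvB_eq (turns : List (List (String × String))) :
    check_alternating_speakers_py_alt turns
      = (List.range (turns.length - 2)).all (fun i => !(pvF turns i && pvF turns (i + 1))) := by
  unfold check_alternating_speakers_py_alt
  simp only [PySem.List.len_eq, List.length_map]
  by_cases h : 2 ≤ turns.length
  · rw [show (turns.length : Int) - 2 = ((turns.length - 2 : Nat) : Int) by omega,
      PySem.List.pyRange_zero_natCast, List.all_map]
    refine List.all_congr rfl (fun k => ?_)
    have e1 : ((k : Int) + 1) = ((k + 1 : Nat) : Int) := by push_cast; ring
    have e2 : ((k : Int) + 2) = ((k + 2 : Nat) : Int) := by push_cast; ring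
    simp only [Function.comp_apply, e1, e2, PySem.List.pyGetD_natCast, pvSpk_getD, pvF]
    have hsym : ∀ (x y : Option String), (x == y) = (y == x) := fun x y => Bool.beq_comm
    rw [show k + 1 + 1 = k + 2 from rfl,
      hsym (pvSpk (turns.getD (k + 1) [])) (pvSpk (turns.getD (k + 2) [])),
      hsym (pvSpk (turns.getD k [])) (pvSpk (turns.getD (k + 1) []))]
  · have h0 : turns.length - 2 = 0 := by omega
    rw [h0]
    have he : PySem.List.pyRange 0 ((turns.length : Int) - 2) = [] := by
      rw [PySem.List.pyRange_of_pos 0 _ (by norm_num), if_neg (by omega)]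
      simp
    rw [he]
    simp

lemma pv_main (turns : List (List (String × String))) :
    check_alternating_speakers_py turns = check_alternating_speakers_py_alt turns := by
  by_cases h : 2 ≤ turns.length
  · rw [pvA_eq turns h, pvB_eq turns]
    rw [show ((1 : Int), (1 : Int)) = ((if (false : Bool) then 2 else 1 : Int), (1 : Int)) by simp,
      pvG_main _ 1 false (by norm_num), pvCheck_zip, pvAllZipTail]
    simp only [Bool.false_and, Bool.not_false, Bool.true_and, List.length_map, List.length_range]
    rw [show turns.length - 1 - 1 = turns.length - 2 from by omega]
    rw [Bool.eq_iff_iff, List.all_eq_true, List.all_eq_true]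
    have hpt : ∀ k, k ∈ List.range (turns.length - 2) →
        (!(((List.range (turns.length - 1)).map (pvF turns)).getD k false
            && ((List.range (turns.length - 1)).map (pvF turns)).getD (k + 1) false))
          = (!(pvF turns k && pvF turns (k + 1))) := by
      intro k hk
      have hk' : k < turns.length - 2 := List.mem_range.mp hk
      have g1 : ((List.range (turns.length - 1)).map (pvF turns)).getD k false
          = pvF turns k := by
        rw [List.getD_eq_getElem?_getD, List.getElem?_map, List.getElem?_range (by omega)]
        rfl
      have g2 : ((List.range (turns.length - 1)).map (pvF turns)).getD (k + 1) false
          = pvF turns (k + 1) := by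
        rw [List.getD_eq_getElem?_getD, List.getElem?_map, List.getElem?_range (by omega)]
        rfl
      rw [g1, g2]
    exact ⟨fun H k hk => by rw [← hpt k hk]; exact H k hk,
           fun H k hk => by rw [hpt k hk]; exact H k hk⟩
  · rw [pvB_eq turns]
    unfold check_alternating_speakers_py
    rw [if_pos (by simp [PySem.List.len_eq]; omega)]
    rw [show turns.length - 2 = 0 from by omega]
    simp

-- ===== VERDICT (by name: the statement is the Claim_ definition above) =====
theorem check_alternating_speakers_py_spec : Claim_equal_check_alternating_speakers_py := by
  intro turns _
  unfold Spec_check_alternating_speakers_py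
  exact pv_main turns
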